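-- pv_equiv track=rewrite | github.com/aryashmullick/beyondbinary | backend/analysis/sentence_analyzer.py | _assign_sentence_roles
-- ===== SOURCE A (Python) =====
-- def _assign_sentence_roles(tagged_tokens: list[tuple[str, str]]) -> list[str]:
--     """
--     Approximate sentence roles using POS-pattern heuristics.
--     Returns a role string per token: subject / predicate / object / modifier / other
--     """
--     n = len(tagged_tokens)
--     roles: list[str] = ["other"] * n
--
--     # Find the main verb index
--     main_verb_idx: int | None = None
--     for i, (_, tag) in enumerate(tagged_tokens):
--         if tag.startswith("VB") or tag == "MD":
--             main_verb_idx = i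
--             break
--
--     if main_verb_idx is None:
--         # No verb found — label nouns as subjects, adjectives as modifiers
--         for i, (_, tag) in enumerate(tagged_tokens):
--             if tag.startswith("NN"):
--                 roles[i] = "subject"
--             elif tag.startswith("JJ") or tag.startswith("RB"):
--                 roles[i] = "modifier"
--         return roles
--
--     # --- Pre-verb tokens ---
--     for i in range(main_verb_idx):
--         _, tag = tagged_tokens[i]
--         if tag.startswith("NN") or tag.startswith("PRP") or tag in ("WP", "WP$", "EX"):
--             roles[i] = "subject"
--         elif tag.startswith("JJ") or tag.startswith("RB") or tag == "PDT":
--             roles[i] = "modifier"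
--         elif tag in ("DT", "PRP$", "WDT"):
--             roles[i] = "modifier"  # determiners modify the subject noun
--
--     # --- Verb cluster ---
--     roles[main_verb_idx] = "predicate"
--     for i in range(main_verb_idx + 1, n):
--         _, tag = tagged_tokens[i]
--         if tag.startswith("VB") or tag == "MD" or tag == "RB":
--             roles[i] = "predicate"
--         else:
--             break  # stop at first non-verb/adverb after the main verb
--     verb_end = i if i < n else main_verb_idx + 1
--
--     # --- Post-verb tokens ---
--     for i in range(verb_end, n):
--         _, tag = tagged_tokens[i]
--         if tag.startswith("NN") or tag.startswith("PRP") or tag in ("WP", "CD"):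
--             roles[i] = "object"
--         elif tag.startswith("JJ") or tag.startswith("RB"):
--             roles[i] = "modifier"
--         elif tag == "IN":
--             roles[i] = "modifier"  # prepositions are modifiers
--
--     return roles
-- ===== SOURCE B (Python) =====
-- # B: one forward pass as a three-state machine (subject zone / verb cluster /
-- # object zone), appending one role per token, instead of three index loops
-- # mutating a preallocated list.
--
-- def _assign_sentence_roles(tagged_tokens: list[tuple[str, str]]) -> list[str]:
--     def is_verb(tag: str) -> bool:
--         return tag.startswith("VB") or tag == "MD"
--
--     if not any(is_verb(tag) for _, tag in tagged_tokens):
--         return ["subject" if tag.startswith("NN")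
--                 else "modifier" if tag.startswith("JJ") or tag.startswith("RB")
--                 else "other"
--                 for _, tag in tagged_tokens]
--
--     roles: list[str] = []
--     state = "subject-zone"
--     for _, tag in tagged_tokens:
--         if state == "subject-zone":
--             if is_verb(tag):
--                 state = "verb-cluster"
--                 roles.append("predicate")
--             elif tag.startswith("NN") or tag.startswith("PRP") or tag in ("WP", "WP$", "EX"):
--                 roles.append("subject")
--             elif (tag.startswith("JJ") or tag.startswith("RB")
--                   or tag in ("PDT", "DT", "PRP$", "WDT")):
--                 roles.append("modifier")
--             else:
--                 roles.append("other")
--         elif state == "verb-cluster" and (is_verb(tag) or tag == "RB"):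
--             roles.append("predicate")
--         else:
--             state = "object-zone"
--             if tag.startswith("NN") or tag.startswith("PRP") or tag in ("WP", "CD"):
--                 roles.append("object")
--             elif tag.startswith("JJ") or tag.startswith("RB") or tag == "IN":
--                 roles.append("modifier")
--             else:
--                 roles.append("other")
--     return roles
-- ===== Notes on version B (the rewrite author's own statement) =====
-- stated objective: alternative
-- what changed: A fills a preallocated roles list through three separate index loops whose post-verb start comes from Python's leftover loop variable; B is a single forward pass through the tokens driven by a three-state machine (subject zone / verb cluster / object zone) that appends one role per token.
-- intended difference: When the first VB*/MD token is the sentence-final token and the token before it is tagged NN*/PRP*/WP/CD/IN, or when the verb cluster runs to the end of the sentence and the last tag is RB, A's leftover loop variable makes the post-verb loop reprocess an already-labelled token (returning 'object'/'modifier' for a pre-verb token, or 'modifier' for a trailing cluster adverb), while B keeps the intended role ('subject'/'other' before the verb, 'predicate' inside the cluster); B's value is intended because those tokens belong to the zone already assigned. — e.g. on _assign_sentence_roles([("dog", "NN"), ("runs", "VB")]): A returns ["object", "predicate"], B returns ["subject", "predicate"]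
import Mathlib
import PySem

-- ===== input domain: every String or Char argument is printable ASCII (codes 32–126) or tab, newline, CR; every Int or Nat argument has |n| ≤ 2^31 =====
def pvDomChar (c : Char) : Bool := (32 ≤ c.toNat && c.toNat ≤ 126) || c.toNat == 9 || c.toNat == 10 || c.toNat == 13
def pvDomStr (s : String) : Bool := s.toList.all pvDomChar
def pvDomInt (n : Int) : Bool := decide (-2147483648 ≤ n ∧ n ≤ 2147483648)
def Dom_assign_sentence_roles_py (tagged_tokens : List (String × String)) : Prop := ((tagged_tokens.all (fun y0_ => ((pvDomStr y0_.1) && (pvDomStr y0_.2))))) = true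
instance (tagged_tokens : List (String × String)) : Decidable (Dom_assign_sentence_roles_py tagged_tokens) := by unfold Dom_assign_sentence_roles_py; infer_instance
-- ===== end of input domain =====

-- B replaces A's three index loops over a preallocated, mutated roles list (whose
-- post-verb start comes from Python's leftover loop variable) by a single forward
-- pass driven by a three-state machine that appends one role per token; on the D_
-- inputs below A's leftover loop variable reprocesses an already-labelled token and
-- B keeps the intended role.


-- shared tag tests (used by both ports and by D_)
def pvMainVerbTag (tag : String) : Bool := PySem.Str.startswith tag "VB" || tag == "MD"
def pvClusterTag (tag : String) : Bool := PySem.Str.startswith tag "VB" || tag == "MD" || tag == "RB"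
def pvTagAt (toks : List (String × String)) (i : Nat) : String := (toks.getD i ("", "")).2

-- ===== PORT A =====
-- the search loop 'for i, (_, tag) in enumerate(...): if ...: main_verb_idx = i; break'
def pvFindMV : List (String × String) → Option Nat
  | [] => none
  | p :: rest =>
      if pvMainVerbTag p.2 then some 0
      else (pvFindMV rest).map (· + 1)

-- body of the no-verb labelling loop
def pvNoVerbStep (toks : List (String × String)) (roles : List String) (i : Nat) : List String :=
  let tag := pvTagAt toks i
  if PySem.Str.startswith tag "NN" then roles.set i "subject"
  else if PySem.Str.startswith tag "JJ" || PySem.Str.startswith tag "RB" then roles.set i "modifier"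
  else roles

-- body of the pre-verb loop
def pvPreStep (toks : List (String × String)) (roles : List String) (i : Nat) : List String :=
  let tag := pvTagAt toks i
  if PySem.Str.startswith tag "NN" || PySem.Str.startswith tag "PRP" || tag == "WP" || tag == "WP$" || tag == "EX" then
    roles.set i "subject"
  else if PySem.Str.startswith tag "JJ" || PySem.Str.startswith tag "RB" || tag == "PDT" then
    roles.set i "modifier"
  else if tag == "DT" || tag == "PRP$" || tag == "WDT" then
    roles.set i "modifier"
  else roles

-- the verb-cluster loop with break; returns (roles, final value of i)
def pvClusterLoop (toks : List (String × String)) : List Nat → List String → Nat → List String × Nat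
  | [], roles, iPrev => (roles, iPrev)
  | i :: rest, roles, _ =>
      if pvClusterTag (pvTagAt toks i) then pvClusterLoop toks rest (roles.set i "predicate") i
      else (roles, i)

-- body of the post-verb loop
def pvPostStep (toks : List (String × String)) (roles : List String) (i : Nat) : List String :=
  let tag := pvTagAt toks i
  if PySem.Str.startswith tag "NN" || PySem.Str.startswith tag "PRP" || tag == "WP" || tag == "CD" then
    roles.set i "object"
  else if PySem.Str.startswith tag "JJ" || PySem.Str.startswith tag "RB" then
    roles.set i "modifier"
  else if tag == "IN" then roles.set i "modifier"
  else roles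

def assign_sentence_roles_py (tagged_tokens : List (String × String)) : List String :=
  let n := tagged_tokens.length
  let roles := List.replicate n "other"
  match pvFindMV tagged_tokens with
  | none => (List.range n).foldl (pvNoVerbStep tagged_tokens) roles
  | some mv =>
      let roles := (List.range mv).foldl (pvPreStep tagged_tokens) roles
      let roles := roles.set mv "predicate"
      -- Python's loop variable i before the cluster loop: mv - 1 (last index of the
      -- pre-verb loop) when mv > 0, else mv (= 0, left from the search loop): Nat's mv - 1.
      let i0 := mv - 1
      let res := pvClusterLoop tagged_tokens (List.range' (mv + 1) (n - (mv + 1))) roles i0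
      let verb_end := if res.2 < n then res.2 else mv + 1
      (List.range' verb_end (n - verb_end)).foldl (pvPostStep tagged_tokens) res.1

-- ===== PORT B =====
-- B's states: subject zone (before the main verb) / verb cluster / object zone
inductive PvZone where
  | subjZone | verbCluster | objZone
deriving DecidableEq, Repr

-- the subject-zone elif chain of Source B (applied to non-verb tokens)
def pvPreLabel (tag : String) : String :=
  if PySem.Str.startswith tag "NN" || PySem.Str.startswith tag "PRP" || tag == "WP" || tag == "WP$" || tag == "EX" then "subject"
  else if PySem.Str.startswith tag "JJ" || PySem.Str.startswith tag "RB" || tag == "PDT" || tag == "DT" || tag == "PRP$" || tag == "WDT" then "modifier"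
  else "other"

-- the object-zone if chain of Source B
def pvPostLabel (tag : String) : String :=
  if PySem.Str.startswith tag "NN" || PySem.Str.startswith tag "PRP" || tag == "WP" || tag == "CD" then "object"
  else if PySem.Str.startswith tag "JJ" || PySem.Str.startswith tag "RB" || tag == "IN" then "modifier"
  else "other"

-- Source B's single for loop: one role appended per token, state carried along
def pvFsm : PvZone → List (String × String) → List String
  | _, [] => []
  | PvZone.subjZone, p :: rest =>
      if pvMainVerbTag p.2 then "predicate" :: pvFsm PvZone.verbCluster rest
      else pvPreLabel p.2 :: pvFsm PvZone.subjZone rest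
  | PvZone.verbCluster, p :: rest =>
      if pvClusterTag p.2 then "predicate" :: pvFsm PvZone.verbCluster rest
      else pvPostLabel p.2 :: pvFsm PvZone.objZone rest
  | PvZone.objZone, p :: rest => pvPostLabel p.2 :: pvFsm PvZone.objZone rest

def assign_sentence_roles_py_alt (tagged_tokens : List (String × String)) : List String :=
  if tagged_tokens.any (fun p => pvMainVerbTag p.2) then
    pvFsm PvZone.subjZone tagged_tokens
  else
    tagged_tokens.map (fun p =>
      if PySem.Str.startswith p.2 "NN" then "subject"
      else if PySem.Str.startswith p.2 "JJ" || PySem.Str.startswith p.2 "RB" then "modifier"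
      else "other")

-- ===== PRECONDITION & SPEC =====
-- When the first VB*/MD token is the sentence-final token and the token before it is tagged
-- NN*/PRP*/WP/CD/IN, or when the verb cluster runs to the end of the sentence and the last
-- tag is RB, A's leftover loop variable makes the post-verb loop reprocess an already-labelled
-- token ('object'/'modifier' for a pre-verb token, 'modifier' for a trailing cluster adverb),
-- while B keeps the intended role ('subject'/'other' before the verb, 'predicate' in the cluster).
def D_assign_sentence_roles_py (tagged_tokens : List (String × String)) : Prop :=
  (2 ≤ tagged_tokens.length ∧
   tagged_tokens.findIdx? (fun p => pvMainVerbTag p.2) = some (tagged_tokens.length - 1) ∧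
   (PySem.Str.startswith (pvTagAt tagged_tokens (tagged_tokens.length - 2)) "NN"
    || PySem.Str.startswith (pvTagAt tagged_tokens (tagged_tokens.length - 2)) "PRP"
    || pvTagAt tagged_tokens (tagged_tokens.length - 2) == "WP"
    || pvTagAt tagged_tokens (tagged_tokens.length - 2) == "CD"
    || pvTagAt tagged_tokens (tagged_tokens.length - 2) == "IN") = true)
  ∨ ((tagged_tokens.findIdx? (fun p => pvMainVerbTag p.2)).any (fun mv =>
        decide (mv + 1 < tagged_tokens.length)
        && (tagged_tokens.drop (mv + 1)).all (fun p => pvClusterTag p.2)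
        && (pvTagAt tagged_tokens (tagged_tokens.length - 1) == "RB")) = true)

instance (tagged_tokens : List (String × String)) : Decidable (D_assign_sentence_roles_py tagged_tokens) := by
  unfold D_assign_sentence_roles_py; infer_instance

def Spec_assign_sentence_roles_py (tagged_tokens : List (String × String)) (out : List String) : Prop :=
  ¬ D_assign_sentence_roles_py tagged_tokens → out = assign_sentence_roles_py_alt tagged_tokens

instance (tagged_tokens : List (String × String)) (out : List String) : Decidable (Spec_assign_sentence_roles_py tagged_tokens out) := by
  unfold Spec_assign_sentence_roles_py; infer_instance

def pvDiffWitness_assign_sentence_roles_py : (List (String × String)) := [("dog", "NN"), ("runs", "VB")]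
def pvDiffWitnessOut_assign_sentence_roles_py : (List String) × (List String) :=
  (["object", "predicate"], ["subject", "predicate"])

-- ===== CLAIM =====
def Claim_unchanged_assign_sentence_roles_py : Prop := ∀ (tagged_tokens : List (String × String)), Dom_assign_sentence_roles_py tagged_tokens → Spec_assign_sentence_roles_py tagged_tokens (assign_sentence_roles_py tagged_tokens)
def Claim_changed_assign_sentence_roles_py : Prop := Dom_assign_sentence_roles_py (pvDiffWitness_assign_sentence_roles_py) ∧ D_assign_sentence_roles_py (pvDiffWitness_assign_sentence_roles_py) ∧ assign_sentence_roles_py (pvDiffWitness_assign_sentence_roles_py) = pvDiffWitnessOut_assign_sentence_roles_py.1 ∧ assign_sentence_roles_py_alt (pvDiffWitness_assign_sentence_roles_py) = pvDiffWitnessOut_assign_sentence_roles_py.2 ∧ pvDiffWitnessOut_assign_sentence_roles_py.1 ≠ pvDiffWitnessOut_assign_sentence_roles_py.2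
def Claim_exact_assign_sentence_roles_py : Prop := ∀ (tagged_tokens : List (String × String)), Dom_assign_sentence_roles_py tagged_tokens → D_assign_sentence_roles_py tagged_tokens → assign_sentence_roles_py tagged_tokens ≠ assign_sentence_roles_py_alt tagged_tokens

-- ===== LEMMAS AND PROOFS =====
-- generic "optional set at index" fold
def pvApplyUpd (upd : Nat → Option String) (r : List String) (i : Nat) : List String :=
  match upd i with | some v => r.set i v | none => r

theorem pv_length_foldl_applyUpd (upd : Nat → Option String) (is : List Nat) :
    ∀ r : List String, (is.foldl (pvApplyUpd upd) r).length = r.length := by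
  induction is with
  | nil => intro r; rfl
  | cons i is ih =>
      intro r
      rw [List.foldl_cons, ih]
      unfold pvApplyUpd; cases upd i <;> simp

theorem pv_getElem?_foldl_applyUpd_notmem (upd : Nat → Option String) (is : List Nat) :
    ∀ (r : List String) (j : Nat), j ∉ is →
    (is.foldl (pvApplyUpd upd) r)[j]? = r[j]? := by
  induction is with
  | nil => intro r j _; rfl
  | cons i is ih =>
      intro r j hj
      simp only [List.mem_cons, not_or] at hj
      rw [List.foldl_cons, ih _ _ hj.2]
      unfold pvApplyUpd; cases h : upd i
      · rfl
      · exact List.getElem?_set_ne (fun e => hj.1 e.symm)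

theorem pv_getElem?_foldl_applyUpd_mem (upd : Nat → Option String) (is : List Nat) :
    ∀ (r : List String) (j : Nat), is.Nodup → j ∈ is → j < r.length →
    (is.foldl (pvApplyUpd upd) r)[j]? = (upd j).or r[j]? := by
  induction is with
  | nil => intro r j _ hj _; cases hj
  | cons i is ih =>
      intro r j hnd hj hlen
      rw [List.nodup_cons] at hnd
      rw [List.foldl_cons]
      rcases List.mem_cons.mp hj with rfl | hmem
      · rw [pv_getElem?_foldl_applyUpd_notmem upd is _ _ hnd.1]
        unfold pvApplyUpd; cases h : upd j
        · simp
        · simp [hlen]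
      · have hji : j ≠ i := fun e => hnd.1 (e ▸ hmem)
        have hlen' : j < (pvApplyUpd upd r i).length := by
          unfold pvApplyUpd; cases upd i <;> simpa
        rw [ih _ _ hnd.2 hmem hlen']
        congr 1
        unfold pvApplyUpd; cases upd i
        · rfl
        · exact List.getElem?_set_ne (fun e => hji e.symm)

theorem pvFindMV_eq (toks : List (String × String)) :
    pvFindMV toks = toks.findIdx? (fun p => pvMainVerbTag p.2) := by
  induction toks with
  | nil => rfl
  | cons p rest ih =>
      simp only [pvFindMV, ih, List.findIdx?_cons]

-- update views of the three loop bodies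
def pvUpdNoVerb (tag : String) : Option String :=
  if PySem.Str.startswith tag "NN" then some "subject"
  else if PySem.Str.startswith tag "JJ" || PySem.Str.startswith tag "RB" then some "modifier"
  else none

def pvUpdPre (tag : String) : Option String :=
  if PySem.Str.startswith tag "NN" || PySem.Str.startswith tag "PRP" || tag == "WP" || tag == "WP$" || tag == "EX" then some "subject"
  else if PySem.Str.startswith tag "JJ" || PySem.Str.startswith tag "RB" || tag == "PDT" then some "modifier"
  else if tag == "DT" || tag == "PRP$" || tag == "WDT" then some "modifier"
  else none

def pvUpdPost (tag : String) : Option String :=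
  if PySem.Str.startswith tag "NN" || PySem.Str.startswith tag "PRP" || tag == "WP" || tag == "CD" then some "object"
  else if PySem.Str.startswith tag "JJ" || PySem.Str.startswith tag "RB" then some "modifier"
  else if tag == "IN" then some "modifier"
  else none

theorem pvNoVerbStep_eq (toks : List (String × String)) :
    pvNoVerbStep toks = pvApplyUpd (fun i => pvUpdNoVerb (pvTagAt toks i)) := by
  funext r i
  unfold pvNoVerbStep pvApplyUpd pvUpdNoVerb
  dsimp only
  split_ifs <;> rfl

theorem pvPreStep_eq (toks : List (String × String)) :
    pvPreStep toks = pvApplyUpd (fun i => pvUpdPre (pvTagAt toks i)) := by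
  funext r i
  unfold pvPreStep pvApplyUpd pvUpdPre
  dsimp only
  split_ifs <;> rfl

theorem pvPostStep_eq (toks : List (String × String)) :
    pvPostStep toks = pvApplyUpd (fun i => pvUpdPost (pvTagAt toks i)) := by
  funext r i
  unfold pvPostStep pvApplyUpd pvUpdPost
  dsimp only
  split_ifs <;> rfl

theorem pvClusterLoop_cons (toks : List (String × String)) (i : Nat) (is : List Nat)
    (r : List String) (iPrev : Nat) :
    pvClusterLoop toks (i :: is) r iPrev =
      if pvClusterTag (pvTagAt toks i) then pvClusterLoop toks is (r.set i "predicate") i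
      else (r, i) := rfl

theorem pvClusterLoop_eq (toks : List (String × String)) (is : List Nat) :
    ∀ (r : List String) (iPrev : Nat),
    pvClusterLoop toks is r iPrev =
      ((is.takeWhile (fun i => pvClusterTag (pvTagAt toks i))).foldl
          (pvApplyUpd (fun _ => some "predicate")) r,
       (is.find? (fun i => !pvClusterTag (pvTagAt toks i))).getD (is.getLast?.getD iPrev)) := by
  induction is with
  | nil => intro r iPrev; rfl
  | cons i is ih =>
      intro r iPrev
      rw [pvClusterLoop_cons]
      by_cases h : pvClusterTag (pvTagAt toks i)
      · rw [if_pos h, ih]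
        simp only [List.takeWhile_cons, h, if_true, List.find?_cons,
          show (!pvClusterTag (pvTagAt toks i)) = false by simp [h], Prod.mk.injEq]
        refine ⟨rfl, ?_⟩
        cases is with
        | nil => simp
        | cons a as =>
            rcases hl : (a :: as).getLast? with _ | v
            · simp [List.getLast?_eq_none_iff] at hl
            · simp [hl]
      · rw [if_neg h]
        simp only [List.takeWhile_cons, h, if_false, List.find?_cons,
          show (!pvClusterTag (pvTagAt toks i)) = true by simp [h]]
        rfl

theorem pv_takeWhile_range'_of_find?_none (p : Nat → Bool) (a m : Nat)
    (h : (List.range' a m).find? (fun i => !p i) = none) :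
    (List.range' a m).takeWhile p = List.range' a m := by
  rw [List.takeWhile_eq_self_iff]
  intro x hx
  have := List.find?_eq_none.mp h x hx
  simpa using this

theorem pv_takeWhile_range'_of_find?_some (p : Nat → Bool) :
    ∀ (m a b : Nat), (List.range' a m).find? (fun i => !p i) = some b →
    (List.range' a m).takeWhile p = List.range' a (b - a) ∧ a ≤ b ∧ b < a + m := by
  intro m
  induction m with
  | zero => intro a b h; simp at h
  | succ m ih =>
      intro a b h
      rw [List.range'_succ] at h ⊢
      rw [List.find?_cons] at h
      by_cases hp : p a
      · rw [show (!p a) = false by simp [hp]] at h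
        obtain ⟨htw, hab, hbm⟩ := ih (a + 1) b h
        have hba : a < b := by omega
        refine ⟨?_, by omega, by omega⟩
        rw [List.takeWhile_cons, if_pos hp, htw,
          show b - a = (b - (a + 1)) + 1 by omega, List.range'_succ]
      · rw [show (!p a) = true by simp [hp]] at h
        injection h with h; subst h
        refine ⟨?_, le_refl a, by omega⟩
        rw [List.takeWhile_cons, if_neg hp]
        simp

-- closed-form view of port A's output at index j when a main verb was found
def pvF (toks : List (String × String)) (mv : Nat) : Option Nat :=
  (List.range' (mv + 1) (toks.length - (mv + 1))).find?
    (fun i => !pvClusterTag (pvTagAt toks i))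

def pvK (toks : List (String × String)) (mv : Nat) : Nat :=
  ((pvF toks mv).map (fun b => b - (mv + 1))).getD (toks.length - (mv + 1))

def pvVeA (toks : List (String × String)) (mv : Nat) : Nat :=
  if mv + 1 < toks.length then (pvF toks mv).getD (toks.length - 1) else mv - 1

def pvBase (toks : List (String × String)) (mv j : Nat) : String :=
  if j = mv then "predicate"
  else if mv + 1 ≤ j ∧ j < mv + 1 + pvK toks mv then "predicate"
  else if j < mv then (pvUpdPre (pvTagAt toks j)).getD "other"
  else "other"

def pvAVal (toks : List (String × String)) (mv j : Nat) : String :=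
  if pvVeA toks mv ≤ j then (pvUpdPost (pvTagAt toks j)).getD (pvBase toks mv j)
  else pvBase toks mv j

theorem pv_or_some (o : Option String) (b : String) : o.or (some b) = some (o.getD b) := by
  cases o <;> rfl

theorem pvA_getElem? (toks : List (String × String)) (mv j : Nat)
    (hmv : toks.findIdx? (fun p => pvMainVerbTag p.2) = some mv)
    (hj : j < toks.length) :
    (assign_sentence_roles_py toks)[j]? = some (pvAVal toks mv j) := by
  have hmvn : mv < toks.length := (List.findIdx?_eq_some_iff_getElem.mp hmv).1
  unfold assign_sentence_roles_py
  rw [pvFindMV_eq, hmv]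
  dsimp only
  rw [pvPreStep_eq, pvPostStep_eq, pvClusterLoop_eq]
  set n := toks.length with hn
  set m := n - (mv + 1) with hm
  set ct : Nat → Bool := fun i => pvClusterTag (pvTagAt toks i) with hct
  set F := (List.range' (mv + 1) m).find? (fun i => !ct i) with hF
  set r1 := (List.range mv).foldl (pvApplyUpd fun i => pvUpdPre (pvTagAt toks i))
      (List.replicate n "other") with hr1
  have hr1len : r1.length = n := by
    rw [hr1, pv_length_foldl_applyUpd]; simp
  have hr2len : (r1.set mv "predicate").length = n := by simp [hr1len]
  have hKspec : ∃ K : Nat, (List.range' (mv + 1) m).takeWhile ct = List.range' (mv + 1) K ∧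
      K = (F.map (fun b => b - (mv + 1))).getD m ∧
      (∀ b, F = some b → mv + 1 ≤ b ∧ b < mv + 1 + m) := by
    cases hFc : F with
    | none =>
        refine ⟨m, ?_, by simp, by simp⟩
        exact pv_takeWhile_range'_of_find?_none ct (mv+1) m (hF ▸ hFc)
    | some b =>
        obtain ⟨htw, hab, hbm⟩ := pv_takeWhile_range'_of_find?_some ct m (mv+1) b (hF ▸ hFc)
        exact ⟨b - (mv + 1), htw, by simp, fun b' hb' => by
          injection hb' with e; subst e; exact ⟨hab, hbm⟩⟩
  obtain ⟨K, htw, hK, hFb⟩ := hKspec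
  rw [htw]
  have hverb : (if (F.getD ((List.range' (mv + 1) m).getLast?.getD (mv - 1))) < n
        then (F.getD ((List.range' (mv + 1) m).getLast?.getD (mv - 1))) else mv + 1)
      = (if mv + 1 < n then F.getD (n - 1) else mv - 1) := by
    by_cases hc : mv + 1 < n
    · cases hFc : F with
      | some b =>
          have hb := hFb b hFc
          simp only [Option.getD_some]
          rw [if_pos (by omega), if_pos hc]
      | none =>
          have hm1 : m = (m - 1) + 1 := by omega
          simp only [Option.getD_none]
          rw [hm1, List.range'_concat]
          simp only [List.getLast?_concat, Option.getD_some]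
          rw [if_pos (by omega), if_pos hc]
          omega
    · have hm0 : m = 0 := by omega
      have hFn : F = none := by rw [hF, hm0]; rfl
      rw [hFn, hm0]
      simp only [Option.getD_none, List.range'_zero, List.getLast?_nil]
      rw [if_pos (by omega), if_neg hc]
  rw [hverb]
  set veA := if mv + 1 < n then F.getD (n - 1) else mv - 1 with hveA
  have hveAn : veA ≤ n - 1 := by
    rw [hveA]
    by_cases hc : mv + 1 < n
    · rw [if_pos hc]
      cases hFc : F with
      | some b => have := hFb b hFc; simp only [Option.getD_some]; omega
      | none => simp
    · rw [if_neg hc]; omega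
  set tag := pvTagAt toks j with htag
  have hbase : ((List.range' (mv + 1) K).foldl (pvApplyUpd fun _ => some "predicate")
        (r1.set mv "predicate"))[j]? =
      some (if j = mv then "predicate"
        else if mv + 1 ≤ j ∧ j < mv + 1 + K then "predicate"
        else if j < mv then (pvUpdPre tag).getD "other"
        else "other") := by
    by_cases hreg : mv + 1 ≤ j ∧ j < mv + 1 + K
    · rw [pv_getElem?_foldl_applyUpd_mem _ _ _ _ List.nodup_range'
        (List.mem_range'_1.mpr hreg) (by rw [hr2len]; exact hj)]
      rw [if_neg (by omega), if_pos hreg]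
      rfl
    · rw [pv_getElem?_foldl_applyUpd_notmem _ _ _ _ (fun hmem => hreg (List.mem_range'_1.mp hmem))]
      by_cases hjmv : j = mv
      · subst hjmv
        rw [List.getElem?_set_self (by rw [hr1len]; exact hmvn), if_pos rfl]
      · rw [List.getElem?_set_ne (fun e => hjmv e.symm), if_neg hjmv, if_neg hreg, hr1]
        by_cases hjlt : j < mv
        · rw [pv_getElem?_foldl_applyUpd_mem _ _ _ _ List.nodup_range
            (List.mem_range.mpr hjlt) (by rw [List.length_replicate]; exact hj)]
          rw [List.getElem?_replicate, if_pos hj, pv_or_some, if_pos hjlt]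
        · rw [pv_getElem?_foldl_applyUpd_notmem _ _ _ _ (fun hmem => hjlt (List.mem_range.mp hmem))]
          rw [List.getElem?_replicate, if_pos hj, if_neg hjlt]
  have hlen3 : ((List.range' (mv + 1) K).foldl (pvApplyUpd fun _ => some "predicate")
      (r1.set mv "predicate")).length = n := by
    rw [pv_length_foldl_applyUpd, hr2len]
  by_cases hpost : veA ≤ j
  · rw [pv_getElem?_foldl_applyUpd_mem _ _ _ _ List.nodup_range'
      (List.mem_range'_1.mpr ⟨hpost, by omega⟩) (by rw [hlen3]; exact hj)]
    rw [hbase, pv_or_some]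
    unfold pvAVal
    rw [show pvVeA toks mv = veA from rfl, if_pos hpost]
    unfold pvBase
    rw [show pvK toks mv = K from hK.symm]
  · rw [pv_getElem?_foldl_applyUpd_notmem _ _ _ _
      (fun hmem => hpost (List.mem_range'_1.mp hmem).1)]
    rw [hbase]
    unfold pvAVal
    rw [show pvVeA toks mv = veA from rfl, if_neg hpost]
    unfold pvBase
    rw [show pvK toks mv = K from hK.symm]

theorem pvTagAt_eq (toks : List (String × String)) (j : Nat) (hj : j < toks.length) :
    pvTagAt toks j = toks[j].2 := by
  unfold pvTagAt
  rw [List.getD_eq_getElem toks _ hj]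

theorem pvA_length (toks : List (String × String)) :
    (assign_sentence_roles_py toks).length = toks.length := by
  unfold assign_sentence_roles_py
  rw [pvFindMV_eq]
  cases hmv : toks.findIdx? (fun p => pvMainVerbTag p.2) with
  | none =>
      dsimp only
      rw [pvNoVerbStep_eq, pv_length_foldl_applyUpd, List.length_replicate]
  | some mv =>
      dsimp only
      rw [pvPreStep_eq, pvPostStep_eq, pvClusterLoop_eq]
      dsimp only
      rw [pv_length_foldl_applyUpd, pv_length_foldl_applyUpd, List.length_set,
        pv_length_foldl_applyUpd, List.length_replicate]

-- ===== B-side lemmas =====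
theorem pvFsm_objZone (rest : List (String × String)) :
    pvFsm PvZone.objZone rest = rest.map (fun p => pvPostLabel p.2) := by
  induction rest with
  | nil => rfl
  | cons p r ih => simp [pvFsm, ih]

theorem pvFsm_verbCluster (rest : List (String × String)) :
    pvFsm PvZone.verbCluster rest =
      (rest.takeWhile (fun p => pvClusterTag p.2)).map (fun _ => "predicate")
      ++ (rest.dropWhile (fun p => pvClusterTag p.2)).map (fun p => pvPostLabel p.2) := by
  induction rest with
  | nil => rfl
  | cons p r ih =>
      by_cases h : pvClusterTag p.2
      · simp [pvFsm, h, List.takeWhile_cons, List.dropWhile_cons, ih]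
      · simp [pvFsm, h, List.takeWhile_cons, List.dropWhile_cons, pvFsm_objZone]

theorem pvFsm_subjZone (toks : List (String × String)) :
    ∀ (mv : Nat), toks.findIdx? (fun p => pvMainVerbTag p.2) = some mv →
    pvFsm PvZone.subjZone toks =
      (toks.take mv).map (fun p => pvPreLabel p.2)
      ++ "predicate" :: pvFsm PvZone.verbCluster (toks.drop (mv + 1)) := by
  induction toks with
  | nil => intro mv h; simp at h
  | cons p r ih =>
      intro mv h
      rw [List.findIdx?_cons] at h
      by_cases hp : pvMainVerbTag p.2
      · rw [if_pos hp] at h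
        injection h with h; subst h
        simp [pvFsm, hp]
      · rw [if_neg hp] at h
        cases hr : r.findIdx? (fun p => pvMainVerbTag p.2) with
        | none => rw [hr] at h; simp at h
        | some mv' =>
            rw [hr] at h
            simp only [Option.map_some] at h
            injection h with h; subst h
            rw [show pvFsm PvZone.subjZone (p :: r) = pvPreLabel p.2 :: pvFsm PvZone.subjZone r
                  from by simp [pvFsm, hp],
              ih mv' hr, List.take_succ_cons, List.map_cons, List.drop_succ_cons,
              List.cons_append]

-- length of takeWhile via findIdx? of the negated predicate
theorem pv_takeWhile_length (p : (String × String) → Bool) (l : List (String × String)) :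
    (l.takeWhile p).length = (l.findIdx? (fun x => !p x)).getD l.length := by
  induction l with
  | nil => rfl
  | cons x r ih =>
      by_cases h : p x
      · rw [List.takeWhile_cons, if_pos h, List.findIdx?_cons,
          show (!p x) = false by simp [h], if_neg (by simp)]
        cases hr : r.findIdx? (fun x => !p x) with
        | none => simp [ih, hr]
        | some t => simp [ih, hr]
      · rw [List.takeWhile_cons, if_neg h, List.findIdx?_cons,
          show (!p x) = true by simp [h], if_pos rfl]
        rfl

-- find? over an index range = findIdx? over the dropped suffix, shifted
theorem pv_find_range'_drop (toks : List (String × String)) :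
    ∀ (m a : Nat), a + m = toks.length →
    (List.range' a m).find? (fun i => !pvClusterTag (pvTagAt toks i))
      = ((toks.drop a).findIdx? (fun p => !pvClusterTag p.2)).map (· + a) := by
  intro m
  induction m with
  | zero =>
      intro a ha
      rw [List.drop_eq_nil_of_le (by omega)]
      rfl
  | succ m ih =>
      intro a ha
      have han : a < toks.length := by omega
      rw [List.range'_succ, List.find?_cons, List.drop_eq_getElem_cons han,
        List.findIdx?_cons, pvTagAt_eq toks a han]
      by_cases h : pvClusterTag toks[a].2
      · rw [show (!pvClusterTag toks[a].2) = false by simp [h]]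
        dsimp only
        rw [ih (a + 1) (by omega)]
        simp only [Bool.false_eq_true, if_false, Option.map_map]
        congr 1
        funext x
        simp only [Function.comp_apply]
        omega
      · rw [show (!pvClusterTag toks[a].2) = true by simp [h]]
        dsimp only
        simp

theorem pvF_eq_drop (toks : List (String × String)) (mv : Nat) (hmv : mv < toks.length) :
    pvF toks mv = ((toks.drop (mv + 1)).findIdx? (fun p => !pvClusterTag p.2)).map (· + (mv + 1)) := by
  unfold pvF
  exact pv_find_range'_drop toks (toks.length - (mv + 1)) (mv + 1) (by omega)

-- closed-form view of port B's output at index j when a main verb exists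
def pvBVal (toks : List (String × String)) (mv j : Nat) : String :=
  if j < mv then pvPreLabel (pvTagAt toks j)
  else if j < (pvF toks mv).getD toks.length then "predicate"
  else pvPostLabel (pvTagAt toks j)

theorem pvB_getElem? (toks : List (String × String)) (mv j : Nat)
    (hmv : toks.findIdx? (fun p => pvMainVerbTag p.2) = some mv)
    (hj : j < toks.length) :
    (assign_sentence_roles_py_alt toks)[j]? = some (pvBVal toks mv j) := by
  have hmvn : mv < toks.length := (List.findIdx?_eq_some_iff_getElem.mp hmv).1
  have hany : toks.any (fun p => pvMainVerbTag p.2) = true := by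
    rw [← List.findIdx?_isSome, hmv]; rfl
  unfold assign_sentence_roles_py_alt
  rw [if_pos hany, pvFsm_subjZone toks mv hmv]
  set n := toks.length with hn
  set rest := toks.drop (mv + 1) with hrest
  have hrestlen : rest.length = n - (mv + 1) := by rw [hrest, List.length_drop]
  have htake : ((toks.take mv).map (fun p => pvPreLabel p.2)).length = mv := by
    rw [List.length_map, List.length_take]; omega
  have hrestget : ∀ k, rest[k]? = toks[mv + 1 + k]? := by
    intro k
    rw [hrest, List.getElem?_drop]
  -- the cluster boundary, B-side
  set t? := rest.findIdx? (fun p => !pvClusterTag p.2) with ht?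
  have hFd : pvF toks mv = t?.map (· + (mv + 1)) := pvF_eq_drop toks mv hmvn
  have htwlen : (rest.takeWhile (fun p => pvClusterTag p.2)).length = t?.getD rest.length := by
    rw [pv_takeWhile_length]
  by_cases h1 : j < mv
  · rw [List.getElem?_append_left (by rw [htake]; exact h1), List.getElem?_map,
      List.getElem?_take_of_lt h1, List.getElem?_eq_getElem hj]
    simp only [Option.map_some]
    unfold pvBVal
    rw [if_pos h1, pvTagAt_eq toks j hj]
  · rw [List.getElem?_append_right (by rw [htake]; omega), htake]
    by_cases h2 : j = mv
    · subst h2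
      simp only [Nat.sub_self, List.getElem?_cons_zero]
      have hltB : j < (pvF toks j).getD n := by
        rw [hFd]
        cases ht : t? with
        | none => simp only [Option.map_none, Option.getD_none]; omega
        | some t =>
            simp only [Option.map_some, Option.getD_some]
            omega
      unfold pvBVal
      rw [if_neg (by omega), if_pos hltB]
    · have hjmv : mv + 1 ≤ j := by omega
      have hk : j - mv = (j - (mv + 1)) + 1 := by omega
      rw [hk, List.getElem?_cons_succ, pvFsm_verbCluster]
      set k := j - (mv + 1) with hkdef
      have hkl : k < rest.length := by omega
      by_cases hin : k < t?.getD rest.length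
      · rw [List.getElem?_append_left (by rw [List.length_map, htwlen]; exact hin),
          List.getElem?_map]
        have hkin : k < (rest.takeWhile (fun p => pvClusterTag p.2)).length := by
          rw [htwlen]; exact hin
        rw [List.getElem?_eq_getElem hkin]
        simp only [Option.map_some]
        have hltB : j < (pvF toks mv).getD n := by
          rw [hFd]
          cases ht : t? with
          | none => simp only [Option.map_none, Option.getD_none]; omega
          | some t =>
              rw [ht] at hin
              simp only [Option.getD_some] at hin
              simp only [ht, Option.map_some, Option.getD_some]
              omega
        unfold pvBVal
        rw [if_neg (by omega), if_pos hltB]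
      · rw [List.getElem?_append_right (by rw [List.length_map, htwlen]; omega),
          List.length_map, htwlen, List.getElem?_map]
        have hsplit : rest = rest.takeWhile (fun p => pvClusterTag p.2)
            ++ rest.dropWhile (fun p => pvClusterTag p.2) := (List.takeWhile_append_dropWhile).symm
        have hdw : (rest.dropWhile (fun p => pvClusterTag p.2))[k - t?.getD rest.length]? = rest[k]? := by
          conv_rhs => rw [hsplit]
          rw [List.getElem?_append_right (by rw [htwlen]; omega), htwlen]
        rw [hdw, hrestget k, show mv + 1 + k = j by omega, List.getElem?_eq_getElem hj]
        simp only [Option.map_some]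
        have hgeB : ¬ j < (pvF toks mv).getD n := by
          rw [hFd]
          cases ht : t? with
          | none =>
              rw [ht] at hin
              simp only [Option.getD_none] at hin
              omega
          | some t =>
              rw [ht] at hin
              simp only [Option.getD_some] at hin
              simp only [ht, Option.map_some, Option.getD_some]
              omega
        unfold pvBVal
        rw [if_neg (by omega), if_neg hgeB, pvTagAt_eq toks j hj]

theorem pvB_length (toks : List (String × String)) :
    (assign_sentence_roles_py_alt toks).length = toks.length := by
  unfold assign_sentence_roles_py_alt
  by_cases h : toks.any (fun p => pvMainVerbTag p.2)
  · rw [if_pos h]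
    cases hmv : toks.findIdx? (fun p => pvMainVerbTag p.2) with
    | none => rw [← List.findIdx?_isSome, hmv] at h; simp at h
    | some mv =>
        have hmvn : mv < toks.length := (List.findIdx?_eq_some_iff_getElem.mp hmv).1
        rw [pvFsm_subjZone toks mv hmv, pvFsm_verbCluster, List.length_append,
          List.length_map, List.length_take, List.length_cons, List.length_append,
          List.length_map, List.length_map]
        have := List.takeWhile_append_dropWhile (p := fun p : String × String => pvClusterTag p.2)
          (l := toks.drop (mv + 1))
        have hlen := congrArg List.length this
        rw [List.length_append, List.length_drop] at hlen
        omega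
  · rw [if_neg h, List.length_map]

-- string-shape lemmas for the boundary cases
theorem pv_startswith_VB_shape (tag : String) (h : PySem.Str.startswith tag "VB" = true) :
    ∃ t, tag.toList = 'V' :: 'B' :: t := by
  rw [PySem.Str.startswith_eq] at h
  have hp := (PySem.Chars.startswith_iff _ _).mp h
  obtain ⟨u, hu⟩ := hp
  exact ⟨u, hu.symm⟩

theorem pv_not_prefix_startswith (tag : String) (c1 c2 : Char) (t : List Char)
    (ht : tag.toList = c1 :: c2 :: t) (p : String) (d1 : Char) (drest : List Char)
    (hp : p.toList = d1 :: drest) (hne : c1 ≠ d1) :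
    PySem.Str.startswith tag p = false := by
  by_contra hc
  have h2 : PySem.Chars.startswith tag.toList p.toList = true := by
    rw [← PySem.Str.startswith_eq]; exact Bool.not_eq_false _ ▸ hc
  obtain ⟨u, hu⟩ := (PySem.Chars.startswith_iff _ _).mp h2
  rw [hp, ht, List.cons_append] at hu
  injection hu with h1 _
  exact hne h1.symm

theorem pv_updPost_none_VB (tag : String) (h : PySem.Str.startswith tag "VB" = true) :
    pvUpdPost tag = none := by
  obtain ⟨t, ht⟩ := pv_startswith_VB_shape tag h
  have hne : ∀ (s : String), s.toList.head? ≠ some 'V' → (tag == s) = false := by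
    intro s hs
    rw [beq_eq_false_iff_ne]
    intro he
    apply hs
    rw [← he, ht]
    rfl
  unfold pvUpdPost
  rw [pv_not_prefix_startswith tag 'V' 'B' t ht "NN" 'N' ['N'] rfl (by decide),
      pv_not_prefix_startswith tag 'V' 'B' t ht "PRP" 'P' ['R', 'P'] rfl (by decide),
      pv_not_prefix_startswith tag 'V' 'B' t ht "JJ" 'J' ['J'] rfl (by decide),
      pv_not_prefix_startswith tag 'V' 'B' t ht "RB" 'R' ['B'] rfl (by decide),
      hne "WP" (by decide), hne "CD" (by decide), hne "IN" (by decide)]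
  rfl

theorem pv_updPost_none_cluster_not_RB (tag : String)
    (hc : pvClusterTag tag = true) (hrb : (tag == "RB") = false) :
    pvUpdPost tag = none := by
  unfold pvClusterTag at hc
  rw [hrb, Bool.or_false] at hc
  rcases Bool.or_eq_true_iff.mp hc with hvb | hmd
  · exact pv_updPost_none_VB tag hvb
  · rw [eq_of_beq hmd]
    decide

theorem pv_updPost_none_main (tag : String) (h : pvMainVerbTag tag = true) :
    pvUpdPost tag = none := by
  unfold pvMainVerbTag at h
  rcases Bool.or_eq_true_iff.mp h with hvb | hmd
  · exact pv_updPost_none_VB tag hvb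
  · rw [eq_of_beq hmd]
    decide

theorem pv_mv_tag (toks : List (String × String)) (mv : Nat)
    (hmv : toks.findIdx? (fun p => pvMainVerbTag p.2) = some mv) :
    mv < toks.length ∧ pvMainVerbTag (pvTagAt toks mv) = true := by
  obtain ⟨h1, h2, _⟩ := List.findIdx?_eq_some_iff_getElem.mp hmv
  exact ⟨h1, by rw [pvTagAt_eq toks mv h1]; exact h2⟩

theorem pvF_some (toks : List (String × String)) (mv b : Nat)
    (hb : pvF toks mv = some b) :
    mv + 1 ≤ b ∧ b < toks.length ∧ pvClusterTag (pvTagAt toks b) = false := by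
  have hmem := List.mem_of_find?_eq_some hb
  have hrange := List.mem_range'_1.mp hmem
  have hp := List.find?_some hb
  refine ⟨hrange.1, by omega, by simpa using hp⟩

theorem pvF_none_all (toks : List (String × String)) (mv : Nat) (hmv : mv < toks.length)
    (hF : pvF toks mv = none) :
    (toks.drop (mv + 1)).all (fun p => pvClusterTag p.2) = true := by
  rw [pvF_eq_drop toks mv hmv] at hF
  have hfi : (toks.drop (mv + 1)).findIdx? (fun p => !pvClusterTag p.2) = none := by
    cases h : (toks.drop (mv + 1)).findIdx? (fun p => !pvClusterTag p.2) with
    | none => rfl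
    | some t => rw [h] at hF; simp at hF
  rw [List.all_eq_true]
  intro x hx
  have := List.findIdx?_eq_none_iff.mp hfi x hx
  simpa using this

theorem pvF_none_last (toks : List (String × String)) (mv : Nat)
    (hc : mv + 1 < toks.length) (hF : pvF toks mv = none) :
    pvClusterTag (pvTagAt toks (toks.length - 1)) = true := by
  have := List.find?_eq_none.mp hF (toks.length - 1)
    (List.mem_range'_1.mpr ⟨by omega, by omega⟩)
  simpa using this

-- conversion lemmas between the labels and the update views
theorem pv_preval (tag : String) :
    (pvUpdPre tag).getD "other" = pvPreLabel tag := by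
  unfold pvUpdPre pvPreLabel
  split_ifs <;> simp_all [Bool.or_assoc]

theorem pv_postval (tag d : String) :
    (pvUpdPost tag).getD d =
      (if (PySem.Str.startswith tag "NN" || PySem.Str.startswith tag "PRP" || tag == "WP" || tag == "CD") = true then "object"
       else if (PySem.Str.startswith tag "JJ" || PySem.Str.startswith tag "RB" || tag == "IN") = true then "modifier"
       else d) := by
  unfold pvUpdPost
  split_ifs <;> simp_all [Bool.or_assoc]

theorem pv_postval_other (tag : String) :
    (pvUpdPost tag).getD "other" = pvPostLabel tag := by
  unfold pvPostLabel
  rw [pv_postval]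

theorem pv_noverbval (tag : String) :
    (pvUpdNoVerb tag).getD "other" =
      (if PySem.Str.startswith tag "NN" = true then "subject"
       else if (PySem.Str.startswith tag "JJ" || PySem.Str.startswith tag "RB") = true then "modifier"
       else "other") := by
  unfold pvUpdNoVerb
  split_ifs <;> simp_all

-- pointwise equality of the two closed forms, outside D_
theorem pv_val_eq (toks : List (String × String)) (mv j : Nat)
    (hmv : toks.findIdx? (fun p => pvMainVerbTag p.2) = some mv)
    (hj : j < toks.length)
    (hD : ¬ D_assign_sentence_roles_py toks) :
    pvAVal toks mv j = pvBVal toks mv j := by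
  obtain ⟨hmvn, hmvtag⟩ := pv_mv_tag toks mv hmv
  unfold pvAVal pvBase pvVeA pvBVal
  set n := toks.length with hn
  set tag := pvTagAt toks j with htag
  by_cases hc : mv + 1 < n
  · rw [if_pos hc]
    cases hFc : pvF toks mv with
    | some b =>
        obtain ⟨hb1, hb2, hbct⟩ := pvF_some toks mv b hFc
        have hKb : pvK toks mv = b - (mv + 1) := by unfold pvK; rw [hFc]; rfl
        simp only [Option.getD_some]
        by_cases h1 : j < mv
        · rw [if_neg (by omega : ¬ b ≤ j), if_neg (by omega : ¬ j = mv),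
            if_neg (by rw [hKb]; omega), if_pos h1, if_pos h1, pv_preval]
        · by_cases h2 : j < b
          · rw [if_neg (by omega : ¬ b ≤ j), if_pos (by omega : j < b)]
            by_cases h3 : j = mv
            · rw [if_pos h3, if_neg h1]
            · rw [if_neg h3, if_pos (by rw [hKb]; omega), if_neg h1]
          · rw [if_pos (by omega : b ≤ j), if_neg (by omega : ¬ j < b),
              if_neg (by omega : ¬ j = mv), if_neg (by rw [hKb]; omega),
              if_neg (by omega : ¬ j < mv), pv_postval_other, if_neg h1]
    | none =>
        have hKm : pvK toks mv = n - (mv + 1) := by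
          unfold pvK; rw [hFc]; rfl
        simp only [Option.getD_none]
        by_cases h1 : j < mv
        · rw [if_neg (by omega : ¬ n - 1 ≤ j), if_neg (by omega : ¬ j = mv),
            if_neg (by rw [hKm]; omega), if_pos h1, if_pos h1, pv_preval]
        · rw [if_pos (by omega : j < n), if_neg h1]
          by_cases h2 : j < n - 1
          · rw [if_neg (by omega : ¬ n - 1 ≤ j)]
            by_cases h3 : j = mv
            · rw [if_pos h3, if_neg h1]
            · rw [if_neg h3, if_pos (by rw [hKm]; omega), if_neg h1]
          · -- j = n - 1: the reprocessed cluster-final token; ¬D_ (second disjunct) applies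
            have hj1 : j = n - 1 := by omega
            have hctt : pvClusterTag tag = true := by
              rw [htag, hj1]; exact pvF_none_last toks mv hc hFc
            have hrb : (pvTagAt toks (n - 1) == "RB") = false := by
              by_contra hcon
              have hcon' : (pvTagAt toks (n - 1) == "RB") = true := by
                revert hcon; cases pvTagAt toks (n - 1) == "RB" <;> simp
              apply hD
              right
              rw [hmv]
              simp only [Option.any_some, Bool.and_eq_true, decide_eq_true_eq]
              exact ⟨⟨hc, pvF_none_all toks mv hmvn hFc⟩, hcon'⟩
            have hpn : pvUpdPost tag = none := by
              apply pv_updPost_none_cluster_not_RB tag hctt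
              rw [htag, hj1]; exact hrb
            rw [if_pos (by omega : n - 1 ≤ j), hpn]
            simp only [Option.getD_none]
            by_cases h3 : j = mv
            · rw [if_pos h3, if_neg h1]
            · rw [if_neg h3, if_pos (by rw [hKm]; omega), if_neg h1]
  · -- the main verb is the final token
    rw [if_neg hc]
    have hF0 : pvF toks mv = none := by
      unfold pvF
      rw [show toks.length - (mv + 1) = 0 by omega]
      rfl
    have hK0 : pvK toks mv = 0 := by
      unfold pvK; rw [hF0]; simp only [Option.map_none, Option.getD_none]; omega
    rw [hF0]
    simp only [Option.getD_none]
    by_cases hmv0 : mv = 0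
    · have hj0 : j = mv := by omega
      have hpn : pvUpdPost tag = none := by
        apply pv_updPost_none_main
        rw [htag, hj0]; exact hmvtag
      rw [if_pos (by omega : mv - 1 ≤ j), if_pos hj0, hpn,
        if_neg (by omega : ¬ j < mv), if_pos (by omega : j < n)]
      rfl
    · by_cases hj1 : j < mv - 1
      · rw [if_neg (by omega : ¬ mv - 1 ≤ j), if_neg (by omega : ¬ j = mv),
          if_neg (by rw [hK0]; omega), if_pos (by omega : j < mv),
          if_pos (by omega : j < mv), pv_preval]
      · by_cases hj2 : j = mv - 1
        · -- the leftover-variable index; ¬D_ (first disjunct) applies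
          have htagf : (PySem.Str.startswith tag "NN" || PySem.Str.startswith tag "PRP"
              || tag == "WP" || tag == "CD" || tag == "IN") = false := by
            by_contra hcon
            apply hD
            left
            refine ⟨by omega, by rw [show toks.length - 1 = mv by omega]; exact hmv, ?_⟩
            rw [show toks.length - 2 = j by omega, ← htag]
            exact Bool.not_eq_false _ ▸ hcon
          simp only [Bool.or_eq_false_iff] at htagf
          obtain ⟨⟨⟨⟨hNN, hPRP⟩, hWP⟩, hCD⟩, hIN⟩ := htagf
          rw [if_pos (by omega : mv - 1 ≤ j), if_neg (by omega : ¬ j = mv),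
            if_neg (by rw [hK0]; omega), if_pos (by omega : j < mv),
            if_pos (by omega : j < mv), pv_postval]
          simp only [hNN, hPRP, hWP, hCD, hIN, Bool.or_false, Bool.false_or]
          by_cases hJR : (PySem.Str.startswith tag "JJ" || PySem.Str.startswith tag "RB") = true
          · have hwp : (tag == "WP$") = false := by
              by_contra hcon
              have : tag = "WP$" := eq_of_beq (Bool.not_eq_false _ ▸ hcon)
              rw [this] at hJR
              revert hJR; decide
            have hex : (tag == "EX") = false := by
              by_contra hcon
              have : tag = "EX" := eq_of_beq (Bool.not_eq_false _ ▸ hcon)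
              rw [this] at hJR
              revert hJR; decide
            simp only [hJR, Bool.false_eq_true, if_false, if_true]
            unfold pvPreLabel
            simp only [hNN, hPRP, hWP, hwp, hex, Bool.or_false, Bool.false_or]
            rcases Bool.or_eq_true_iff.mp hJR with hjj | hrb
            · simp only [hjj, Bool.true_or, Bool.or_true, if_true, Bool.false_eq_true, if_false]
            · simp only [hrb, Bool.true_or, Bool.or_true, if_true, Bool.false_eq_true, if_false]
          · have hJR' : (PySem.Str.startswith tag "JJ" || PySem.Str.startswith tag "RB") = false :=
              Bool.not_eq_true _ ▸ hJR
            simp only [hJR', hIN, Bool.false_eq_true, Bool.false_or, if_false]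
            rw [pv_preval]
        · have hjm : j = mv := by omega
          have hpn : pvUpdPost tag = none := by
            apply pv_updPost_none_main
            rw [htag, hjm]; exact hmvtag
          rw [if_pos (by omega : mv - 1 ≤ j), if_pos hjm, hpn,
            if_neg (by omega : ¬ j < mv), if_pos (by omega : j < n)]
          rfl

theorem pv_noverb_eq (toks : List (String × String))
    (hmv : toks.findIdx? (fun p => pvMainVerbTag p.2) = none) :
    assign_sentence_roles_py toks = assign_sentence_roles_py_alt toks := by
  have hany : toks.any (fun p => pvMainVerbTag p.2) = false := by
    rw [← List.findIdx?_isSome, hmv]; rfl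
  apply List.ext_getElem?
  intro j
  by_cases hj : j < toks.length
  · unfold assign_sentence_roles_py
    rw [pvFindMV_eq, hmv]
    dsimp only
    rw [pvNoVerbStep_eq]
    rw [pv_getElem?_foldl_applyUpd_mem _ _ _ _ List.nodup_range (List.mem_range.mpr hj)
      (by rw [List.length_replicate]; exact hj)]
    rw [List.getElem?_replicate, if_pos hj, pv_or_some]
    unfold assign_sentence_roles_py_alt
    rw [if_neg (by simp [hany])]
    rw [List.getElem?_map, List.getElem?_eq_getElem hj]
    simp only [Option.map_some]
    rw [pv_noverbval, pvTagAt_eq toks j hj]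
  · rw [List.getElem?_eq_none (by rw [pvA_length]; omega),
      List.getElem?_eq_none (by rw [pvB_length]; omega)]

theorem pv_equal (toks : List (String × String))
    (hD : ¬ D_assign_sentence_roles_py toks) :
    assign_sentence_roles_py toks = assign_sentence_roles_py_alt toks := by
  cases hmv : toks.findIdx? (fun p => pvMainVerbTag p.2) with
  | none => exact pv_noverb_eq toks hmv
  | some mv =>
      apply List.ext_getElem?
      intro j
      by_cases hj : j < toks.length
      · rw [pvA_getElem? toks mv j hmv hj, pvB_getElem? toks mv j hmv hj,
          pv_val_eq toks mv j hmv hj hD]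
      · rw [List.getElem?_eq_none (by rw [pvA_length]; omega),
          List.getElem?_eq_none (by rw [pvB_length]; omega)]

theorem pv_diff (toks : List (String × String))
    (hD : D_assign_sentence_roles_py toks) :
    assign_sentence_roles_py toks ≠ assign_sentence_roles_py_alt toks := by
  rcases hD with ⟨hn2, hmv, htagc⟩ | hcl
  · -- sentence-final main verb: index n-2 differs
    have hj : toks.length - 2 < toks.length := by omega
    intro heq
    have hA := pvA_getElem? toks (toks.length - 1) (toks.length - 2) hmv hj
    have hB := pvB_getElem? toks (toks.length - 1) (toks.length - 2) hmv hj
    rw [heq, hB] at hA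
    have hval := Option.some.inj hA
    have hAval : pvAVal toks (toks.length - 1) (toks.length - 2)
        = (pvUpdPost (pvTagAt toks (toks.length - 2))).getD
            ((pvUpdPre (pvTagAt toks (toks.length - 2))).getD "other") := by
      unfold pvAVal pvBase pvVeA
      rw [if_neg (by omega : ¬ (toks.length - 1) + 1 < toks.length),
        if_pos (by omega : (toks.length - 1) - 1 ≤ toks.length - 2),
        if_neg (by omega : ¬ toks.length - 2 = toks.length - 1),
        if_neg (by omega : ¬ ((toks.length - 1) + 1 ≤ toks.length - 2 ∧
          toks.length - 2 < (toks.length - 1) + 1 + pvK toks (toks.length - 1))),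
        if_pos (by omega : toks.length - 2 < toks.length - 1)]
    have hBval : pvBVal toks (toks.length - 1) (toks.length - 2)
        = pvPreLabel (pvTagAt toks (toks.length - 2)) := by
      unfold pvBVal
      rw [if_pos (by omega : toks.length - 2 < toks.length - 1)]
    rw [hAval, hBval] at hval
    by_cases hobj : (PySem.Str.startswith (pvTagAt toks (toks.length - 2)) "NN"
        || PySem.Str.startswith (pvTagAt toks (toks.length - 2)) "PRP"
        || pvTagAt toks (toks.length - 2) == "WP"
        || pvTagAt toks (toks.length - 2) == "CD") = true
    · unfold pvUpdPost at hval
      rw [if_pos hobj] at hval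
      simp only [Option.getD_some] at hval
      unfold pvPreLabel at hval
      split_ifs at hval <;> exact absurd hval (by decide)
    · have h' : (PySem.Str.startswith (pvTagAt toks (toks.length - 2)) "NN"
          || PySem.Str.startswith (pvTagAt toks (toks.length - 2)) "PRP"
          || pvTagAt toks (toks.length - 2) == "WP"
          || pvTagAt toks (toks.length - 2) == "CD") = false := Bool.not_eq_true _ ▸ hobj
      rw [h', Bool.false_or] at htagc
      rw [eq_of_beq htagc] at hval
      revert hval
      decide
  · -- verb cluster to the end with trailing RB: index n-1 differs
    cases hmv : toks.findIdx? (fun p => pvMainVerbTag p.2) with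
    | none => rw [hmv] at hcl; simp at hcl
    | some mv =>
        rw [hmv] at hcl
        simp only [Option.any_some, Bool.and_eq_true, decide_eq_true_eq] at hcl
        obtain ⟨⟨hlt, hall⟩, hrb⟩ := hcl
        have hmvn : mv < toks.length := by omega
        have hF0 : pvF toks mv = none := by
          rw [pvF_eq_drop toks mv hmvn]
          have : (toks.drop (mv + 1)).findIdx? (fun p => !pvClusterTag p.2) = none := by
            rw [List.findIdx?_eq_none_iff]
            intro x hx
            have := List.all_eq_true.mp hall x hx
            simp [this]
          rw [this]
          rfl
        have hj : toks.length - 1 < toks.length := by omega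
        intro heq
        have hA := pvA_getElem? toks mv (toks.length - 1) hmv hj
        have hB := pvB_getElem? toks mv (toks.length - 1) hmv hj
        rw [heq, hB] at hA
        have hval := Option.some.inj hA
        have htg : pvTagAt toks (toks.length - 1) = "RB" := eq_of_beq hrb
        have hAval : pvAVal toks mv (toks.length - 1) = "modifier" := by
          unfold pvAVal pvVeA
          rw [if_pos hlt, hF0]
          simp only [Option.getD_none]
          rw [if_pos (by omega : toks.length - 1 ≤ toks.length - 1), htg,
            show pvUpdPost "RB" = some "modifier" from by decide]
          rfl
        have hBval : pvBVal toks mv (toks.length - 1) = "predicate" := by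
          unfold pvBVal
          rw [if_neg (by omega : ¬ toks.length - 1 < mv), hF0]
          simp only [Option.getD_none]
          rw [if_pos (by omega : toks.length - 1 < toks.length)]
        rw [hAval, hBval] at hval
        exact absurd hval (by decide)

-- ===== VERDICT =====
theorem assign_sentence_roles_py_spec : Claim_unchanged_assign_sentence_roles_py := by
  intro tagged_tokens _
  unfold Spec_assign_sentence_roles_py
  intro hD
  exact pv_equal tagged_tokens hD

theorem assign_sentence_roles_py_changed : Claim_changed_assign_sentence_roles_py := by
  unfold Claim_changed_assign_sentence_roles_py; decide

theorem assign_sentence_roles_py_tight : Claim_exact_assign_sentence_roles_py := by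
  intro tagged_tokens _ hD
  exact pv_diff tagged_tokens hD
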